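-- pv_equiv track=rewrite | github.com/gajaedev/jagalchi-server-AI | jagalchi_ai/ai_core/service/tech/tech_fingerprint.py | _infer_tag_type
-- ===== SOURCE A (Python) =====
-- from typing import Dict, List, Optional
--
-- def _infer_tag_type(text: str, aliases: List[str]) -> str:
--     """
--     텍스트에서 태그 타입을 추론합니다.
--
--     @param {str} text - 입력 텍스트.
--     @param {List[str]} aliases - 기술 별칭 목록.
--     @returns {str} 태그 타입.
--     """
--     lowered = text.lower()
--     for alias in aliases:
--         if f"{alias} deprecated" in lowered or "deprecated" in lowered or "legacy" in lowered:
--             return "deprecated"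
--         if f"{alias} 대안" in lowered or "alternative" in lowered:
--             return "alternative"
--     if any(alias in lowered for alias in aliases):
--         if len(aliases) > 1 and aliases[0] in lowered:
--             return "core"
--     return "optional"
-- ===== SOURCE B (Python) =====
-- def _infer_tag_type(text, aliases):
--     lowered = text.lower()
--     if not aliases:
--         return "optional"
--     if "deprecated" in lowered or "legacy" in lowered:
--         return "deprecated"
--     if "alternative" in lowered or any(f"{a} \ub300\uc548" in lowered for a in aliases):
--         return "alternative"
--     if len(aliases) > 1 and aliases[0] in lowered:
--         return "core"
--     return "optional"
-- ===== Notes on version B (the rewrite author's own statement) =====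
-- stated objective: faster
-- what changed: B replaces A's per-alias early-return loop, which rescans the whole text for the loop-invariant 'deprecated'/'legacy'/'alternative' substrings on every alias, with flat staged guards that run each global scan once (plus one any-scan for '<alias> 대안') and drop the redundant any() before the aliases[0] core check.
import Mathlib
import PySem

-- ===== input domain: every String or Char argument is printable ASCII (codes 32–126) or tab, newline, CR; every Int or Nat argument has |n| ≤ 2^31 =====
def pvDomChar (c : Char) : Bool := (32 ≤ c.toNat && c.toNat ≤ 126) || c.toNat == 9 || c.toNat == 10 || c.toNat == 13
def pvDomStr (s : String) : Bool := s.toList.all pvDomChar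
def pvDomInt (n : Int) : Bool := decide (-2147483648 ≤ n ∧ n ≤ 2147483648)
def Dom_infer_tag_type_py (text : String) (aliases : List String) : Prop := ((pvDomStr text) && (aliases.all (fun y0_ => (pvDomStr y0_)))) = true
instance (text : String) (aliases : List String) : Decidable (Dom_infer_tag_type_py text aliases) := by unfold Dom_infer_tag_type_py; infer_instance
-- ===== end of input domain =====

-- B replaces A's per-alias early-return loop by hoisting the loop-invariant "deprecated"/"legacy"/"alternative"
-- checks into flat staged guards (objective: simpler); return values are proved equal on the whole domain.


-- ===== PORT A =====
-- the early-returning 'for alias in aliases' loop of A, step for step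
def inferLoopA (lowered : List Char) : List String → Option String
  | [] => none
  | a :: rest =>
    if PySem.Chars.isIn (a.toList ++ " deprecated".toList) lowered
        || PySem.Chars.isIn "deprecated".toList lowered
        || PySem.Chars.isIn "legacy".toList lowered then some "deprecated"
    else if PySem.Chars.isIn (a.toList ++ " 대안".toList) lowered
        || PySem.Chars.isIn "alternative".toList lowered then some "alternative"
    else inferLoopA lowered rest

-- A's body after 'lowered = text.lower()': the loop, then the any()/core check, then "optional"
def inferTailA (lowered : List Char) (aliases : List String) : String :=
  match inferLoopA lowered aliases with
  | some r => r
  | none =>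
    if aliases.any (fun a => PySem.Chars.isIn a.toList lowered) then
      -- len(aliases) > 1 and aliases[0] in lowered (aliases[0] guarded by the length check)
      if decide (1 < aliases.length) && PySem.Chars.isIn (PySem.List.pyGetD aliases 0 "").toList lowered
      then "core" else "optional"
    else "optional"

def infer_tag_type_py (text : String) (aliases : List String) : String :=
  inferTailA (PySem.Chars.lower text.toList) aliases

-- ===== PORT B =====
-- B's body after 'lowered = text.lower()': flat staged guards
def inferStagedB (lowered : List Char) (aliases : List String) : String :=
  match aliases with
  | [] => "optional"
  | a0 :: rest =>
    if PySem.Chars.isIn "deprecated".toList lowered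
        || PySem.Chars.isIn "legacy".toList lowered then "deprecated"
    else if PySem.Chars.isIn "alternative".toList lowered
        || (a0 :: rest).any (fun a => PySem.Chars.isIn (a.toList ++ " 대안".toList) lowered) then "alternative"
    else if decide (1 < (a0 :: rest).length) && PySem.Chars.isIn a0.toList lowered then "core"
    else "optional"

def infer_tag_type_py_alt (text : String) (aliases : List String) : String :=
  inferStagedB (PySem.Chars.lower text.toList) aliases

-- ===== PRECONDITION & SPEC =====
def Spec_infer_tag_type_py (text : String) (aliases : List String) (out : String) : Prop := out = infer_tag_type_py_alt text aliases
instance (text : String) (aliases : List String) (out : String) : Decidable (Spec_infer_tag_type_py text aliases out) := by unfold Spec_infer_tag_type_py; infer_instance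

-- ===== CLAIM (what is proved, stated in full; the proofs are below) =====
def Claim_equal_infer_tag_type_py : Prop := ∀ (text : String) (aliases : List String), Dom_infer_tag_type_py text aliases → Spec_infer_tag_type_py text aliases (infer_tag_type_py text aliases)

-- ===== LEMMAS AND PROOFS =====

-- if the needle y is absent, so is any extension x ++ y
lemma isIn_append_left_false (x y s : List Char) (h : PySem.Chars.isIn y s = false) :
    PySem.Chars.isIn (x ++ y) s = false := by
  rw [PySem.Chars.isIn_eq_false_iff] at *
  exact fun hinf => h ((List.suffix_append x y).isInfix.trans hinf)

-- "alias deprecated" absent whenever "deprecated" is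
lemma isIn_alias_dep_false (a : String) (lowered : List Char)
    (hd : PySem.Chars.isIn "deprecated".toList lowered = false) :
    PySem.Chars.isIn (a.toList ++ " deprecated".toList) lowered = false := by
  have h : " deprecated".toList = " ".toList ++ "deprecated".toList := rfl
  rw [h, ← List.append_assoc]
  exact isIn_append_left_false _ _ _ hd

-- with the loop-invariant global checks false, A's loop is exactly B's any-scan for "<alias> 대안"
lemma inferLoopA_eq (lowered : List Char)
    (hd : PySem.Chars.isIn "deprecated".toList lowered = false)
    (hl : PySem.Chars.isIn "legacy".toList lowered = false)
    (ha : PySem.Chars.isIn "alternative".toList lowered = false) :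
    ∀ aliases : List String, inferLoopA lowered aliases =
      if aliases.any (fun a => PySem.Chars.isIn (a.toList ++ " 대안".toList) lowered)
      then some "alternative" else none := by
  intro aliases
  induction aliases with
  | nil => simp only [inferLoopA, List.any_nil, Bool.false_eq_true, if_false]
  | cons a rest ih =>
    unfold inferLoopA
    rw [isIn_alias_dep_false a lowered hd, hd, hl, ha, List.any_cons]
    rcases Bool.eq_false_or_eq_true (PySem.Chars.isIn (a.toList ++ " 대안".toList) lowered) with h2 | h2 <;>
      rw [h2] <;>
      simp only [Bool.or_false, Bool.false_or, Bool.true_or, Bool.or_self,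
        Bool.false_eq_true, if_false, if_true, ih]

-- pointwise equality of the two post-lower bodies
lemma tail_eq_staged (lowered : List Char) (aliases : List String) :
    inferTailA lowered aliases = inferStagedB lowered aliases := by
  cases aliases with
  | nil => simp only [inferTailA, inferLoopA, inferStagedB, List.any_nil, Bool.false_eq_true, if_false]
  | cons a0 rest =>
    unfold inferTailA inferStagedB
    rcases Bool.eq_false_or_eq_true (PySem.Chars.isIn "deprecated".toList lowered) with hd | hd
    · rw [inferLoopA, hd]
      simp only [Bool.true_or, Bool.or_true, if_true]
    · rcases Bool.eq_false_or_eq_true (PySem.Chars.isIn "legacy".toList lowered) with hl | hl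
      · rw [inferLoopA, hd, hl]
        simp only [Bool.or_true, Bool.or_false, if_true]
      · rcases Bool.eq_false_or_eq_true (PySem.Chars.isIn "alternative".toList lowered) with ha | ha
        · rw [inferLoopA, isIn_alias_dep_false a0 lowered hd, hd, hl, ha]
          simp only [Bool.or_true, Bool.or_self, Bool.true_or,
            Bool.false_eq_true, if_false, if_true]
        · rw [inferLoopA_eq lowered hd hl ha (a0 :: rest)]
          have hget : PySem.List.pyGetD (a0 :: rest) 0 "" = a0 := by simp [pysem]
          rcases Bool.eq_false_or_eq_true
              ((a0 :: rest).any (fun a => PySem.Chars.isIn (a.toList ++ " 대안".toList) lowered)) with hany | hany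
          · simp only [hany, hd, hl, ha, Bool.or_self, Bool.false_or,
              Bool.false_eq_true, if_false, if_true]
          · simp only [hany, hd, hl, ha, Bool.or_self,
              Bool.false_eq_true, if_false, hget, List.any_cons]
            -- the core stage: A's any() test is subsumed by the aliases[0] membership test
            rcases Bool.eq_false_or_eq_true (PySem.Chars.isIn a0.toList lowered) with h0 | h0
            · simp only [h0, Bool.true_or, if_true, Bool.and_true]
            · simp only [h0, Bool.false_or, Bool.and_false, Bool.false_eq_true, if_false]
              rcases Bool.eq_false_or_eq_true (rest.any (fun a => PySem.Chars.isIn a.toList lowered)) with hr | hr <;>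
                simp only [hr, Bool.false_eq_true, if_false, if_true]

-- ===== VERDICT (by name: the statement is the Claim_ definition above) =====
theorem infer_tag_type_py_spec : Claim_equal_infer_tag_type_py := by
  intro text aliases _
  unfold Spec_infer_tag_type_py infer_tag_type_py infer_tag_type_py_alt
  exact tail_eq_staged _ aliases
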